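-- pv_equiv track=rewrite | github.com/kumin/AlgorithmsDataStructures | src/main/python/TikiTickets.py | waitingTime
-- ===== SOURCE A (Python) =====
-- def waitingTime(tickets, p):
--     t = 0
--
--     for i in range(len(tickets)):
--         if tickets[i] < tickets[p]:
--             t += tickets[i]
--         else:
--             if i <= p:
--                 t += tickets[p]
--             else:
--                 t += tickets[p] - 1
--
--     return t
-- ===== SOURCE B (Python) =====
-- def waitingTime(tickets, p):
--     tp = tickets[p]
--     pairs = sorted(enumerate(tickets), key=lambda iv: iv[1])
--     t = 0
--     k = 0
--     while k < len(pairs) and pairs[k][1] < tp: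
--         t += pairs[k][1]
--         k += 1
--     for i, v in pairs[k:]:
--         t += tp - 1 if i > p else tp
--     return t
-- ===== Notes on version B (the rewrite author's own statement) =====
-- stated objective: alternative
-- what changed: Replaces A's single positional loop with a value-and-position branch cascade by a sort-then-scan: sort (index, value) pairs by ticket count, sum the prefix of people wanting fewer than tickets[p], then charge tp (or tp-1 for people standing behind p) for everyone in the remaining suffix; Pre_ excludes p out of range, where on a non-empty list both raise IndexError while on the empty list A's loop never touches tickets[p] and accidentally returns 0 but B raises.
-- outside the precondition, e.g. on waitingTime([], 0): A returns 0, B raises IndexError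
import Mathlib
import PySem

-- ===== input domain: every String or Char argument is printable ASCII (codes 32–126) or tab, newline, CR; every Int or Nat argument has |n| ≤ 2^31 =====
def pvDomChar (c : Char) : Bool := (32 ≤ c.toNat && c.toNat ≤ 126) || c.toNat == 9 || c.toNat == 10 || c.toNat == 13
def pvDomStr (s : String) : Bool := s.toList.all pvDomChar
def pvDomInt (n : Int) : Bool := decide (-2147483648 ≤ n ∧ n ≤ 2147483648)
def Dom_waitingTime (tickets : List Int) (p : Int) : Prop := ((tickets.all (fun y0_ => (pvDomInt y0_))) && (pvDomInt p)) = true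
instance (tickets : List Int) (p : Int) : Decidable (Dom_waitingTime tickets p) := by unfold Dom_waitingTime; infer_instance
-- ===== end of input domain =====

-- B replaces A's positional loop by sort-then-scan: sort (index, value) pairs by value, sum the prefix below tickets[p], flat-charge the suffix (alternative decomposition, similar cost).

-- ===== PORT A =====
def waitingTime (tickets : List Int) (p : Int) : Int :=
  (PySem.List.pyRange 0 tickets.length 1).foldl (fun t i =>
    if PySem.List.pyGetD tickets i 0 < PySem.List.pyGetD tickets p 0 then
      t + PySem.List.pyGetD tickets i 0
    else if i ≤ p then
      t + PySem.List.pyGetD tickets p 0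
    else
      t + (PySem.List.pyGetD tickets p 0 - 1)) 0

-- ===== PORT B =====
-- the while loop 'while k < len(pairs) and pairs[k][1] < tp: t += pairs[k][1]; k += 1'
-- as structural recursion: returns (prefix sum t, remaining pairs[k:])
def wtSplit (tp : Int) : List (Int × Int) → Int × List (Int × Int)
  | [] => (0, [])
  | (i, v) :: rest =>
      if v < tp then
        let r := wtSplit tp rest
        (v + r.1, r.2)
      else (0, (i, v) :: rest)

def waitingTime_alt (tickets : List Int) (p : Int) : Int :=
  let tp := PySem.List.pyGetD tickets p 0
  let pairs := PySem.List.sorted (PySem.List.enumerate tickets) (fun iv => iv.2) false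
  let s := wtSplit tp pairs
  s.2.foldl (fun t iv => if p < iv.1 then t + (tp - 1) else t + tp) s.1

-- ===== PRECONDITION & SPEC =====
-- Pre_ excludes p out of range (counting negative indices): on a non-empty list both A and B raise IndexError there, while on the empty list A's loop body never runs so it accidentally returns 0 for any p, whereas B indexes tickets[p] up front and raises.
def Pre_waitingTime (tickets : List Int) (p : Int) : Prop :=
  PySem.Raise.InRange tickets.length p
instance (tickets : List Int) (p : Int) : Decidable (Pre_waitingTime tickets p) := by
  unfold Pre_waitingTime; infer_instance
def pvWitness_waitingTime : List Int × Int := ([2, 6, 3, 4, 5], 2)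

def Spec_waitingTime (tickets : List Int) (p : Int) (out : Int) : Prop := out = waitingTime_alt tickets p
instance (tickets : List Int) (p : Int) (out : Int) : Decidable (Spec_waitingTime tickets p out) := by unfold Spec_waitingTime; infer_instance

-- ===== CLAIM (what is proved, stated in full; the proofs are below) =====
def Claim_equal_waitingTime : Prop := ∀ (tickets : List Int) (p : Int), Dom_waitingTime tickets p → Pre_waitingTime tickets p → Spec_waitingTime tickets p (waitingTime tickets p)

-- ===== LEMMAS AND PROOFS =====

-- per-person contribution, as A computes it
def wtContrib (tp p : Int) (iv : Int × Int) : Int :=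
  if iv.2 < tp then iv.2 else if iv.1 ≤ p then tp else tp - 1

-- A's indexed loop is the sum of contributions over enumerate
theorem pv_A_sum (tickets : List Int) (p : Int) :
    waitingTime tickets p
      = ((PySem.List.enumerate tickets).map
          (wtContrib (PySem.List.pyGetD tickets p 0) p)).sum := by
  unfold waitingTime
  set tp := PySem.List.pyGetD tickets p 0 with htp
  rw [PySem.List.foldl_congr_mem
      (g := fun t i => t + wtContrib tp p (i, PySem.List.pyGetD tickets i 0))]
  · rw [PySem.List.foldl_add]
    rw [PySem.List.enumerate_eq_map_pyRange (d := 0), List.map_map]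
    simp [Function.comp_def, PySem.List.len]
  · intro acc x _
    unfold wtContrib
    split_ifs <;> simp_all

-- B's split-and-scan is the same sum over any value-sorted pair list
theorem pv_B_sum (tp p : Int) (l : List (Int × Int))
    (hs : l.Pairwise (fun a b => a.2 ≤ b.2)) :
    ((wtSplit tp l).2.foldl
        (fun t iv => if p < iv.1 then t + (tp - 1) else t + tp) (wtSplit tp l).1)
      = (l.map (wtContrib tp p)).sum := by
  have key : ∀ (l : List (Int × Int)), l.Pairwise (fun a b => a.2 ≤ b.2) →
      (wtSplit tp l).1 + ((wtSplit tp l).2.map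
        (fun iv => if p < iv.1 then tp - 1 else tp)).sum
      = (l.map (wtContrib tp p)).sum := by
    intro l hs
    induction l with
    | nil => simp [wtSplit]
    | cons hd rest ih =>
      obtain ⟨i, v⟩ := hd
      rw [List.pairwise_cons] at hs
      by_cases h : v < tp
      · simp only [wtSplit, h, if_pos, List.map_cons, List.sum_cons, wtContrib]
        have := ih hs.2
        omega
      · simp only [wtSplit, h, if_neg, not_false_eq_true]
        rw [List.map_congr_left (f := fun iv => if p < iv.1 then tp - 1 else tp)
            (g := wtContrib tp p)]
        · simp
        · intro x hx
          have hge : tp ≤ x.2 := by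
            rcases List.mem_cons.mp hx with hx | hx
            · subst hx; omega
            · have := hs.1 x hx; omega
          unfold wtContrib
          split_ifs <;> omega
  rw [PySem.List.foldl_congr_mem
      (g := fun t iv => t + (if p < iv.1 then tp - 1 else tp))]
  · rw [PySem.List.foldl_add]
    rw [← key l hs]
  · intro acc x _
    split_ifs <;> ring

-- ===== VERDICT (by name: the statement is the Claim_ definition above) =====
theorem waitingTime_spec : Claim_equal_waitingTime := by
  intro tickets p _ _
  unfold Spec_waitingTime waitingTime_alt
  rw [pv_A_sum]
  rw [pv_B_sum _ _ _ (PySem.List.sorted_pairwise _ _)]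
  exact (List.Perm.map _ (PySem.List.sorted_perm _ _ _)).sum_eq.symm
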